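-- pv_equiv track=rewrite | github.com/LuisCabelloCabanillas/1-DAM-Safa | Programación/Python/Entrega 2.py | enmascara
-- ===== SOURCE A (Python) =====
-- def enmascara(cadena):
--     arrayAux= cadena.split(" ")
--     ListaSalida = []
--
--     for i in arrayAux:
--         palabraAux=""
--         for j in range(len(i)):
--             if j==0 or j==len(i)-1:
--                 palabraAux=palabraAux+i[j]
--             else:
--                 palabraAux=palabraAux+"*"
--         ListaSalida.append(palabraAux)
--     return " ".join(ListaSalida)
-- ===== SOURCE B (Python) =====
-- def enmascara(cadena):
--     return " ".join(
--         w if len(w) <= 2 else w[0] + "*" * (len(w) - 2) + w[-1]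
--         for w in cadena.split(" ")
--     )
-- ===== Notes on version B (the rewrite author's own statement) =====
-- stated objective: idiomatic
-- what changed: The per-character index loop that grows the masked word one character at a time is replaced by a closed-form construction per word (first char, a repeated-asterisk fill of length len-2, last char, guarded for words of length at most 2), collected by a generator inside join.
import Mathlib
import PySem

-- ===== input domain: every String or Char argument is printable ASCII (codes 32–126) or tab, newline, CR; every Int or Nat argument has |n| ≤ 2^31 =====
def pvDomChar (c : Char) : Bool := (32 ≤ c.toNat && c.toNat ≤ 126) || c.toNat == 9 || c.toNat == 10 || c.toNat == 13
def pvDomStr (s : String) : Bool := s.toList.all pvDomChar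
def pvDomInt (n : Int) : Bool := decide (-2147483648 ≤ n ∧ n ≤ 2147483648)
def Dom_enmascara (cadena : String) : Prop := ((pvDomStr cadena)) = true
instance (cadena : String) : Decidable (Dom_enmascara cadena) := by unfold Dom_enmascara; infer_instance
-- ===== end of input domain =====

-- B replaces A's per-character index loop with a per-word closed-form slice construction (idiomatic).
-- Both ports work on the word lists as List Char; the inner loops are named helpers.

-- ===== PORT A =====
-- inner loop of A: for j in range(len(i)): palabraAux += i[j] if j==0 or j==len(i)-1 else "*"
-- (i[j] is always in range inside the loop, so pyGetD's default ' ' is never read)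
def enmascaraWordA (i : List Char) : List Char :=
  (PySem.List.pyRange 0 (PySem.Chars.len i) 1).foldl
    (fun palabraAux j =>
      if j == 0 || j == PySem.Chars.len i - 1 then
        palabraAux ++ [PySem.List.pyGetD i j ' ']
      else
        palabraAux ++ ['*'])
    []

def enmascara (cadena : String) : String :=
  let arrayAux := PySem.Chars.splitOn cadena.toList [' ']
  let listaSalida := arrayAux.foldl (fun acc i => acc ++ [enmascaraWordA i]) []
  String.ofList (PySem.Chars.join [' '] listaSalida)

-- ===== PORT B =====
-- B's per-word expression: w if len(w) <= 2 else w[0] + "*"*(len(w)-2) + w[-1]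
def enmascaraWordB (w : List Char) : List Char :=
  if PySem.Chars.len w ≤ 2 then w
  else [PySem.List.pyGetD w 0 ' '] ++ List.replicate (w.length - 2) '*' ++ [PySem.List.pyGetD w (-1) ' ']

def enmascara_alt (cadena : String) : String :=
  String.ofList (PySem.Chars.join [' '] ((PySem.Chars.splitOn cadena.toList [' ']).map enmascaraWordB))

-- ===== PRECONDITION & SPEC =====
def Spec_enmascara (cadena : String) (out : String) : Prop := out = enmascara_alt cadena
instance (cadena : String) (out : String) : Decidable (Spec_enmascara cadena out) := by unfold Spec_enmascara; infer_instance

-- ===== CLAIM (what is proved, stated in full; the proofs are below) =====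
def Claim_equal_enmascara : Prop := ∀ (cadena : String), Dom_enmascara cadena → Spec_enmascara cadena (enmascara cadena)

-- ===== LEMMAS AND PROOFS =====

theorem foldl_append_singleton {α β : Type} (h : α → β) (l : List α) (acc : List β) :
    l.foldl (fun acc i => acc ++ [h i]) acc = acc ++ l.map h := by
  induction l generalizing acc with
  | nil => simp
  | cons x xs ih => simp [List.foldl, ih]

theorem flatMap_singleton_fn {α β : Type} (f : α → β) (l : List α) :
    l.flatMap (fun a => [f a]) = l.map f := by
  induction l with
  | nil => rfl
  | cons x xs ih => simp [List.flatMap_cons, ih]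

theorem wordA_eq_map (i : List Char) :
    enmascaraWordA i =
      (List.range i.length).map
        (fun j => if j = 0 ∨ j = i.length - 1 then i.getD j ' ' else '*') := by
  unfold enmascaraWordA
  rw [PySem.List.foldl_congr_mem _ _
    (fun palabraAux j =>
      palabraAux ++ [if j == 0 || j == PySem.Chars.len i - 1 then PySem.List.pyGetD i j ' ' else '*'])
    [] (by intro acc j _; dsimp only; split_ifs <;> rfl)]
  rw [PySem.List.foldl_append_eq_flatMap]
  simp only [PySem.Chars.len, PySem.List.pyRange_zero_natCast, List.nil_append]
  rw [List.flatMap_map, flatMap_singleton_fn]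
  apply List.map_congr_left
  intro j hj
  simp only [List.mem_range] at hj
  by_cases hc : (j : Int) = 0 ∨ (j : Int) = (i.length : Int) - 1
  · rw [if_pos (by simp only [beq_iff_eq, Bool.or_eq_true]; omega),
        if_pos (by omega), PySem.List.pyGetD_natCast]
  · rw [if_neg (by simp only [beq_iff_eq, Bool.or_eq_true]; omega), if_neg (by omega)]

theorem word_eq (i : List Char) : enmascaraWordA i = enmascaraWordB i := by
  rw [wordA_eq_map]
  unfold enmascaraWordB
  simp only [PySem.Chars.len]
  by_cases h2 : i.length ≤ 2
  · rw [if_pos (by exact_mod_cast h2)]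
    match i, h2 with
    | [], _ => rfl
    | [a], _ => rfl
    | [a, b], _ => rfl
  · rw [if_neg (by exact_mod_cast h2)]
    have h2 : 2 < i.length := by omega
    have hne : i ≠ [] := by intro h; subst h; simp at h2
    rw [PySem.List.pyGetD_neg_one _ _ hne, PySem.List.pyGetD_zero]
    apply List.ext_getElem
    · simp; omega
    · intro j hj hj'
      simp only [List.length_map, List.length_range] at hj
      simp only [List.getElem_map, List.getElem_range]
      by_cases h0 : j = 0
      · subst h0
        simp [List.getD, List.getElem?_eq_getElem (by omega : 0 < i.length)]
      · by_cases h1 : j = i.length - 1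
        · subst h1
          have : ¬ i.length - 1 < 1 + (i.length - 2) := by omega
          rw [if_pos (Or.inr rfl)]
          simp only [List.getD]
          rw [List.getElem?_eq_getElem (by omega)]
          simp only [Option.getD_some]
          rw [List.getElem_append_right (by simp; omega)]
          simp only [List.length_append, List.length_cons, List.length_nil, List.length_replicate]
          rw [List.getElem_singleton]
          rw [List.getLast_eq_getElem]
        · rw [if_neg (by tauto)]
          rw [List.getElem_append_left (by simp; omega)]
          rw [List.getElem_append_right (by simp; omega)]
          simp

-- ===== VERDICT (by name: the statement is the Claim_ definition above) =====
theorem enmascara_spec : Claim_equal_enmascara := by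
  intro cadena _
  unfold Spec_enmascara enmascara enmascara_alt
  simp only [foldl_append_singleton]
  congr 2
  apply List.map_congr_left
  intro i _
  exact word_eq i
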